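-- pv_equiv track=rewrite | github.com/vareize/Prog2_RT | manipulation.py | indice_2eme_occurrence
-- ===== SOURCE A (Python) =====
-- def indice_2eme_occurrence(chaine, caractere):
--     l, p = chaine.count(caractere), chaine.find(caractere)
--     if l > 1:
--         for i in range(p+1, len(chaine)):
--             if chaine[i] == caractere:
--                 return i
--     else:
--         return -1
-- ===== SOURCE B (Python) =====
-- def indice_2eme_occurrence(chaine, caractere):
--     seen = 0
--     for i, c in enumerate(chaine):
--         if c == caractere:
--             seen += 1
--             if seen == 2:
--                 return i
--     return -1
-- ===== Notes on version B (the rewrite author's own statement) =====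
-- stated objective: simpler
-- what changed: B replaces A's three scans (count(), find(), then an index loop from find+1) by one enumerate pass that keeps a match counter and returns the index the moment the counter reaches 2.
-- outside the precondition, e.g. on indice_2eme_occurrence('abab', 'ab'): A returns None, B returns -1
import Mathlib
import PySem

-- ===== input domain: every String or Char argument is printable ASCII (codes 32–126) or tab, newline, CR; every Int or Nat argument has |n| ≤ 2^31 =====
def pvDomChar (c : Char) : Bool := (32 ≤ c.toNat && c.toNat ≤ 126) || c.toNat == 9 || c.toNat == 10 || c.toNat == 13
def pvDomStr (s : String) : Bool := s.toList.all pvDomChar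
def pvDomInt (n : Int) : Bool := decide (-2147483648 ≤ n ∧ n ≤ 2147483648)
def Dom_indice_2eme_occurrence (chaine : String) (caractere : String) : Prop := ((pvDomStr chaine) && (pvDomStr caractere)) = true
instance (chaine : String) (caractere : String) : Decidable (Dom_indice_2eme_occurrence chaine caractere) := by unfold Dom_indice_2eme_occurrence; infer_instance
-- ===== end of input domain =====

-- B replaces A's count()/find() scans plus range loop by a single counted pass over enumerate(chaine); objective: simpler.


-- ===== PORT A =====
-- the 'for i in range(p+1, len(chaine)): if chaine[i] == caractere: return i' loop;
-- on [] Python falls off the function and returns None (excluded by Pre_), -1 here;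
-- the 'none' arm of pyGet? is unreachable (every i produced by the range is in range).
def pvALoop (chaine : String) (caractere : String) : List Int → Int
  | [] => -1
  | i :: rest =>
    match PySem.Str.pyGet? chaine i with
    | some ch => if String.ofList [ch] == caractere then i else pvALoop chaine caractere rest
    | none => pvALoop chaine caractere rest

def indice_2eme_occurrence (chaine : String) (caractere : String) : Int :=
  let l := PySem.Str.count chaine caractere
  let p := PySem.Str.find chaine caractere
  if (l : Int) > 1 then
    pvALoop chaine caractere (PySem.List.pyRange (p + 1) (PySem.Str.len chaine) 1)
  else -1

-- ===== PORT B =====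
-- single pass: 'for i, c in enumerate(chaine): if c == caractere: seen += 1; if seen == 2: return i'
def pvBLoop (caractere : String) : List (Int × Char) → Int → Int
  | [], _ => -1
  | (i, ch) :: rest, seen =>
    if String.ofList [ch] == caractere then
      if seen + 1 == (2 : Int) then i else pvBLoop caractere rest (seen + 1)
    else pvBLoop caractere rest seen

def indice_2eme_occurrence_alt (chaine : String) (caractere : String) : Int :=
  pvBLoop caractere (PySem.List.enumerate chaine.toList 0) 0

-- ===== PRECONDITION & SPEC =====
-- Pre_ excludes exactly the inputs on which A falls off its loop and returns None (not an int):
-- caractere not a single character yet occurring more than once as a substring of chaine.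
def Pre_indice_2eme_occurrence (chaine : String) (caractere : String) : Prop :=
  caractere.toList.length = 1 ∨ PySem.Str.count chaine caractere ≤ 1
instance (chaine : String) (caractere : String) : Decidable (Pre_indice_2eme_occurrence chaine caractere) := by unfold Pre_indice_2eme_occurrence; infer_instance
def pvWitness_indice_2eme_occurrence : String × String := ("abcab", "a")
def Spec_indice_2eme_occurrence (chaine : String) (caractere : String) (out : Int) : Prop := out = indice_2eme_occurrence_alt chaine caractere
instance (chaine : String) (caractere : String) (out : Int) : Decidable (Spec_indice_2eme_occurrence chaine caractere out) := by unfold Spec_indice_2eme_occurrence; infer_instance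

-- ===== CLAIM (what is proved, stated in full; the proofs are below) =====
def Claim_equal_indice_2eme_occurrence : Prop := ∀ (chaine : String) (caractere : String), Dom_indice_2eme_occurrence chaine caractere → Pre_indice_2eme_occurrence chaine caractere → Spec_indice_2eme_occurrence chaine caractere (indice_2eme_occurrence chaine caractere)

-- ===== LEMMAS AND PROOFS =====

-- first / second match position of the character test, starting offset n; -1 when absent
def pvFst (caractere : String) : List Char → Int → Int
  | [], _ => -1
  | ch :: t, n => if String.ofList [ch] == caractere then n else pvFst caractere t (n + 1)

def pvSnd (caractere : String) : List Char → Int → Int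
  | [], _ => -1
  | ch :: t, n => if String.ofList [ch] == caractere then pvFst caractere t (n + 1) else pvSnd caractere t (n + 1)

theorem pvOfList_beq (ch : Char) (s : String) : (String.ofList [ch] == s) = ([ch] == s.toList) := by
  by_cases h : [ch] = s.toList
  · have h2 : String.ofList [ch] = s := by apply String.ext; rw [String.toList_ofList]; exact h
    rw [h2]; simp [h]
  · have h2 : String.ofList [ch] ≠ s := by
      intro hc; apply h; rw [← hc, String.toList_ofList]
    simp [h, h2]

theorem pvBLoop_one (caractere : String) : ∀ (l : List Char) (n : Int),
    pvBLoop caractere (PySem.List.enumerate l n) 1 = pvFst caractere l n := by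
  intro l
  induction l with
  | nil => intro n; rfl
  | cons ch t ih =>
    intro n
    show pvBLoop caractere ((n, ch) :: PySem.List.enumerate t (n + 1)) 1 = _
    by_cases h : (String.ofList [ch] == caractere) = true
    · simp [pvBLoop, pvFst, h]
    · simp [pvBLoop, pvFst, h, ih]

theorem pvBLoop_zero (caractere : String) : ∀ (l : List Char) (n : Int),
    pvBLoop caractere (PySem.List.enumerate l n) 0 = pvSnd caractere l n := by
  intro l
  induction l with
  | nil => intro n; rfl
  | cons ch t ih =>
    intro n
    show pvBLoop caractere ((n, ch) :: PySem.List.enumerate t (n + 1)) 0 = _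
    by_cases h : (String.ofList [ch] == caractere) = true
    · simp [pvBLoop, pvSnd, h, pvBLoop_one]
    · simp [pvBLoop, pvSnd, h, ih]

theorem pvAlt_eq (chaine caractere : String) :
    indice_2eme_occurrence_alt chaine caractere = pvSnd caractere chaine.toList 0 := by
  unfold indice_2eme_occurrence_alt
  exact pvBLoop_zero caractere chaine.toList 0

theorem pvFst_ge (caractere : String) : ∀ (l : List Char) (n : Int),
    pvFst caractere l n ≠ -1 → n ≤ pvFst caractere l n := by
  intro l
  induction l with
  | nil => intro n h; simp [pvFst] at h
  | cons ch t ih =>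
    intro n h
    simp only [pvFst] at h ⊢
    by_cases hc : (String.ofList [ch] == caractere) = true
    · simp [hc]
    · simp only [if_neg hc] at h ⊢
      have := ih (n + 1) h
      omega

theorem pvFst_lt (caractere : String) : ∀ (l : List Char) (n : Int),
    pvFst caractere l n ≠ -1 → pvFst caractere l n < n + l.length := by
  intro l
  induction l with
  | nil => intro n h; simp [pvFst] at h
  | cons ch t ih =>
    intro n h
    simp only [pvFst] at h ⊢
    by_cases hc : (String.ofList [ch] == caractere) = true
    · simp [hc]
    · simp only [if_neg hc] at h ⊢
      have := ih (n + 1) h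
      simp only [List.length_cons]
      push_cast
      omega

theorem pvFst_eq_neg_one_iff (caractere : String) : ∀ (l : List Char) (n : Int), 0 ≤ n →
    (pvFst caractere l n = -1 ↔ l.countP (fun ch => String.ofList [ch] == caractere) = 0) := by
  intro l
  induction l with
  | nil => intro n _; simp [pvFst]
  | cons ch t ih =>
    intro n hn
    simp only [pvFst, List.countP_cons]
    by_cases hc : (String.ofList [ch] == caractere) = true
    · rw [if_pos hc]
      have hb' : (if (String.ofList [ch] == caractere) = true then 1 else 0) = 1 := by simp [hc]
      rw [hb']
      constructor
      · intro h; exfalso; omega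
      · intro h; exact absurd h (by omega)
    · have hb : (String.ofList [ch] == caractere) = false := by simpa using hc
      simp only [hb, Bool.false_eq_true, if_false, add_zero]
      exact ih (n + 1) (by omega)

theorem pvSnd_of_count_le_one (caractere : String) : ∀ (l : List Char) (n : Int), 0 ≤ n →
    l.countP (fun ch => String.ofList [ch] == caractere) ≤ 1 → pvSnd caractere l n = -1 := by
  intro l
  induction l with
  | nil => intro n _ _; rfl
  | cons ch t ih =>
    intro n hn h
    simp only [List.countP_cons] at h
    simp only [pvSnd]
    by_cases hc : (String.ofList [ch] == caractere) = true
    · have hb' : (if (String.ofList [ch] == caractere) = true then 1 else 0) = 1 := by simp [hc]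
      rw [hb'] at h
      rw [if_pos hc]
      exact (pvFst_eq_neg_one_iff caractere t (n + 1) (by omega)).2 (by omega)
    · have hb' : (if (String.ofList [ch] == caractere) = true then 1 else 0) = 0 := by simp [hc]
      rw [hb'] at h
      rw [if_neg hc]
      exact ih (n + 1) (by omega) (by omega)

theorem pvSnd_eq (caractere : String) : ∀ (l : List Char) (n : Nat),
    pvSnd caractere l (n : Int) =
      if pvFst caractere l (n : Int) = -1 then -1
      else pvFst caractere (l.drop ((pvFst caractere l (n : Int)).toNat + 1 - n)) (pvFst caractere l (n : Int) + 1) := by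
  intro l
  induction l with
  | nil => intro n; simp [pvSnd, pvFst]
  | cons ch t ih =>
    intro n
    simp only [pvSnd, pvFst]
    by_cases hc : (String.ofList [ch] == caractere) = true
    · simp only [if_pos hc]
      rw [if_neg (by omega)]
      have h1 : (n : Int).toNat + 1 - n = 1 := by omega
      rw [h1, List.drop_one, List.tail_cons]
    · simp only [if_neg hc]
      by_cases h : pvFst caractere t ((n : Int) + 1) = -1
      · rw [if_pos h]
        have hcast : ((n : Nat) : Int) + 1 = ((n + 1 : Nat) : Int) := by push_cast; ring
        rw [hcast] at h ⊢
        rw [ih (n + 1), if_pos h]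
      · rw [if_neg h]
        have hcast : ((n : Nat) : Int) + 1 = ((n + 1 : Nat) : Int) := by push_cast; ring
        rw [hcast] at h ⊢
        have hge := pvFst_ge caractere t ((n + 1 : Nat) : Int) h
        rw [ih (n + 1), if_neg h]
        have harith : (pvFst caractere t ((n + 1 : Nat) : Int)).toNat + 1 - n =
            ((pvFst caractere t ((n + 1 : Nat) : Int)).toNat + 1 - (n + 1)) + 1 := by
          omega
        rw [harith, List.drop_succ_cons]

-- counting a single-character needle is counting the character
theorem pvCountGo_single (c : Char) : ∀ (fuel : Nat) (l : List Char) (acc : Nat), l.length ≤ fuel →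
    PySem.Chars.count.go [c] fuel l acc = acc + l.countP (fun ch => ch == c) := by
  intro fuel
  induction fuel with
  | zero =>
    intro l acc h
    have hl : l = [] := List.eq_nil_of_length_eq_zero (by omega)
    subst hl
    simp [PySem.Chars.count.go]
  | succ f ih =>
    intro l acc h
    cases l with
    | nil => simp [PySem.Chars.count.go]
    | cons ch t =>
      simp only [List.length_cons] at h
      show (if [c].isPrefixOf (ch :: t) then
              PySem.Chars.count.go [c] f (List.drop [c].length (ch :: t)) (acc + 1)
            else PySem.Chars.count.go [c] f t acc) = _
      by_cases hc : c = ch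
      · subst hc
        rw [if_pos (by simp [List.isPrefixOf])]
        rw [List.length_singleton, List.drop_one, List.tail_cons, ih t (acc + 1) (by omega)]
        simp only [List.countP_cons]
        simp
        omega
      · rw [if_neg (by simp [List.isPrefixOf]; intro h'; exact hc h')]
        rw [ih t acc (by omega)]
        simp only [List.countP_cons]
        have : (ch == c) = false := by simp; exact fun h' => hc h'.symm
        simp [this]

theorem pvCount_single (l : List Char) (c : Char) :
    PySem.Chars.count l [c] = l.countP (fun ch => ch == c) := by
  unfold PySem.Chars.count
  rw [if_neg (by simp)]
  simpa using pvCountGo_single c l.length l 0 le_rfl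

theorem pvFindGo_single (caractere : String) (c : Char) (hc : caractere.toList = [c]) :
    ∀ (l : List Char) (k : Nat), PySem.Chars.find.go [c] l k = pvFst caractere l (k : Int) := by
  intro l
  induction l with
  | nil => intro k; simp [PySem.Chars.find.go, pvFst]
  | cons ch t ih =>
    intro k
    show (if [c].isPrefixOf (ch :: t) then ((k : Nat) : Int) else PySem.Chars.find.go [c] t (k + 1)) = _
    simp only [pvFst, pvOfList_beq, hc]
    by_cases h : ch = c
    · subst h
      rw [if_pos (by simp [List.isPrefixOf]), if_pos (by simp)]
    · rw [if_neg (by simp [List.isPrefixOf]; intro h'; exact h h'.symm),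
          if_neg (by simp [h])]
      have hcast : (k : Int) + 1 = ((k + 1 : Nat) : Int) := by push_cast; ring
      rw [hcast, ih (k + 1)]

theorem pvCountP_eq (caractere : String) (c : Char) (hc : caractere.toList = [c]) (l : List Char) :
    l.countP (fun ch => String.ofList [ch] == caractere) = l.countP (fun ch => ch == c) := by
  apply List.countP_congr
  intro ch _
  rw [pvOfList_beq, hc]
  constructor
  · intro h; simp at h ⊢; exact h
  · intro h; simp at h ⊢; exact h

theorem pvALoop_eq (chaine caractere : String) : ∀ (d a : Nat), chaine.toList.length - a = d →
    pvALoop chaine caractere (PySem.List.pyRange (a : Int) (PySem.Str.len chaine) 1) =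
      pvFst caractere (chaine.toList.drop a) (a : Int) := by
  intro d
  induction d with
  | zero =>
    intro a ha
    have hlen : chaine.toList.length ≤ a := by omega
    have h1 : PySem.List.pyRange (a : Int) (PySem.Str.len chaine) 1 = [] := by
      simp only [PySem.List.pyRange]
      rw [if_neg (show ¬(1 : Int) = 0 by norm_num), if_pos (show (0 : Int) < 1 by norm_num),
          if_neg (show ¬((a : Nat) : Int) < PySem.Str.len chaine by rw [PySem.Str.len_eq]; omega)]
      simp
    rw [h1, List.drop_eq_nil_of_le hlen]
    rfl
  | succ f ih =>
    intro a ha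
    have hlt : a < chaine.toList.length := by omega
    have hstop : (a : Int) < PySem.Str.len chaine := by
      rw [PySem.Str.len_eq]
      omega
    rw [PySem.List.pyRange_one_cons hstop]
    have hdrop : chaine.toList.drop a = chaine.toList[a] :: chaine.toList.drop (a + 1) :=
      (List.getElem_cons_drop hlt).symm
    rw [hdrop]
    simp only [pvALoop, pvFst]
    have hget : PySem.Str.pyGet? chaine (a : Int) = some chaine.toList[a] := by
      rw [PySem.Str.pyGet?_natCast]
      exact List.getElem?_eq_getElem hlt
    rw [hget]
    by_cases h : (String.ofList [chaine.toList[a]] == caractere) = true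
    · simp [h]
    · simp only [if_neg h]
      have hcast : (a : Int) + 1 = ((a + 1 : Nat) : Int) := by push_cast; ring
      rw [hcast, ih (a + 1) (by omega)]

-- ===== VERDICT (by name: the statement is the Claim_ definition above) =====
theorem indice_2eme_occurrence_spec : Claim_equal_indice_2eme_occurrence := by
  intro chaine caractere _ hpre
  unfold Spec_indice_2eme_occurrence
  rw [pvAlt_eq]
  unfold indice_2eme_occurrence
  by_cases hlen : caractere.toList.length = 1
  · obtain ⟨c, hc⟩ : ∃ c, caractere.toList = [c] := by
      cases hh : caractere.toList with
      | nil => rw [hh] at hlen; simp at hlen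
      | cons x xs =>
        rw [hh] at hlen
        simp at hlen
        exact ⟨x, by rw [hlen]⟩
    have hcount : PySem.Str.count chaine caractere =
        chaine.toList.countP (fun ch => String.ofList [ch] == caractere) := by
      rw [PySem.Str.count_eq, hc, pvCount_single, pvCountP_eq caractere c hc]
    by_cases hl : ((PySem.Str.count chaine caractere : Int) > 1)
    · rw [if_pos hl]
      have hcp : 1 < chaine.toList.countP (fun ch => String.ofList [ch] == caractere) := by
        rw [hcount] at hl
        exact_mod_cast hl
      have hfind : PySem.Str.find chaine caractere = pvFst caractere chaine.toList 0 := by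
        rw [PySem.Str.find_eq, hc]
        unfold PySem.Chars.find
        exact pvFindGo_single caractere c hc chaine.toList 0
      set p := pvFst caractere chaine.toList 0 with hp
      have hne : p ≠ -1 := by
        rw [hp]
        intro h
        rw [(pvFst_eq_neg_one_iff caractere chaine.toList 0 le_rfl).1 h] at hcp
        omega
      have hge : (0 : Int) ≤ p := pvFst_ge caractere chaine.toList 0 hne
      have hlt' : p < chaine.toList.length := by
        have := pvFst_lt caractere chaine.toList 0 hne
        omega
      have hcast : p + 1 = ((p.toNat + 1 : Nat) : Int) := by omega
      rw [hfind, hcast]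
      rw [pvALoop_eq chaine caractere (chaine.toList.length - (p.toNat + 1)) (p.toNat + 1) rfl]
      have h2 := pvSnd_eq caractere chaine.toList 0
      rw [Nat.cast_zero, ← hp] at h2
      rw [h2, if_neg hne]
      have h3 : p.toNat + 1 - 0 = p.toNat + 1 := rfl
      rw [h3, ← hcast]
    · rw [if_neg hl]
      apply (pvSnd_of_count_le_one caractere chaine.toList 0 le_rfl _).symm
      rw [← hcount]
      omega
  · -- caractere is not a single character: no position matches, and Pre_ forces count ≤ 1
    have hcp : chaine.toList.countP (fun ch => String.ofList [ch] == caractere) = 0 := by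
      rw [List.countP_eq_zero]
      intro ch _
      rw [pvOfList_beq]
      have hne : [ch] ≠ caractere.toList := by
        intro h
        apply hlen
        rw [← h]
        rfl
      simp [beq_eq_false_iff_ne.mpr hne]
    have hcnt : PySem.Str.count chaine caractere ≤ 1 := by
      rcases hpre with h | h
      · exact absurd h hlen
      · exact h
    rw [if_neg (by exact_mod_cast Nat.not_lt.2 hcnt)]
    exact (pvSnd_of_count_le_one caractere chaine.toList 0 le_rfl (by omega)).symm
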